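-- pv_equiv track=rewrite | github.com/ssf2xguile/GarbageCollection | src/50_investigateAccuracyOfTrain100000.py | parse_string_into_apis
-- ===== SOURCE A (Python) =====
-- def parse_string_into_apis(str_):
--     """
--     タブ区切りの予測文字列からAPIシーケンス（リスト）を抽出する。
--     """
--     if not isinstance(str_, str):
--         return [] # 空のリストを返す
--
--     apis = []
--     prediction_part = str_.split('\t')[0]
--     eles = prediction_part.strip().split('.')
--
--     if len(eles) < 2:
--         # パース不能な場合は、元の文字列を要素とするリストを返す
--         return [prediction_part.strip().lower().replace(' ', '')]
--
--     first_lib = eles[0]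
--
--     for i in range(1, len(eles) - 1):
--         try:
--             module_, library_ = eles[i].strip().rsplit(' ', 1)
--             api = f"{first_lib.strip()}.{module_.strip()}"
--             apis.append(api.lower().replace(' ', ''))
--             first_lib = library_
--         except ValueError:
--             parts = eles[i].strip().split(' ', 1)
--             module_ = parts[0]
--             library_ = parts[1] if len(parts) > 1 else module_
--
--             api = f"{first_lib.strip()}.{module_.strip()}"
--             apis.append(api.lower().replace(' ', ''))
--             first_lib = library_
--
--     api = f"{first_lib.strip()}.{eles[-1].strip()}"
--     apis.append(api.lower().replace(' ', ''))
--
--     # ★★★ 修正点: 最初のAPIメソッドではなく、APIシーケンスのリスト全体を返す ★★★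
--     return apis
-- ===== SOURCE B (Python) =====
-- def parse_string_into_apis(str_):
--     if not isinstance(str_, str):
--         return []
--     prediction_part = str_.split('\t')[0]
--     eles = prediction_part.strip().split('.')
--     if len(eles) < 2:
--         return [prediction_part.strip().lower().replace(' ', '')]
--     # two-phase: map each middle element to a (module, library) pair, then zip shifted lists
--     pairs = []
--     for e in eles[1:-1]:
--         s = e.strip()
--         if ' ' in s:
--             m, l = s.rsplit(' ', 1)
--         else:
--             m = l = s
--         pairs.append((m, l))
--     libs = [eles[0]] + [l for _, l in pairs]
--     mods = [m for m, _ in pairs] + [eles[-1]]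
--     return [f"{l.strip()}.{m.strip()}".lower().replace(' ', '')
--             for l, m in zip(libs, mods)]
-- ===== Notes on version B (the rewrite author's own statement) =====
-- stated objective: simpler
-- what changed: Replaces A's stateful loop (first_lib threaded through a try/except accumulator) with a stateless two-phase decomposition: map each middle element to a (module, library) pair, then zip the shifted library/module lists into the output.
import Mathlib
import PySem

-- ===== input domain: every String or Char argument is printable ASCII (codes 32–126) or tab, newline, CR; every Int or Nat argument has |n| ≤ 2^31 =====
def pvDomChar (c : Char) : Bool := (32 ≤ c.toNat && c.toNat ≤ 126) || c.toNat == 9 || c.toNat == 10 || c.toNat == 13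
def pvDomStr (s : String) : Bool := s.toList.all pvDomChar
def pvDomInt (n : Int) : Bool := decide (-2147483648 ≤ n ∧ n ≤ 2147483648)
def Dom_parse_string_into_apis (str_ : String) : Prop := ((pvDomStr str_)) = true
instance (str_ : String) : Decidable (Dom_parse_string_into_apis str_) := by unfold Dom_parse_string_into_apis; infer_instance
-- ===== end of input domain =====

-- B changes A's stateful try/except loop (first_lib threaded through an accumulator) into a
-- stateless two-phase decomposition: map each middle element to a (module, library) pair, then
-- zip the shifted library/module lists into the output. Objective: simpler; same return value.

-- Shared primitive helpers (the per-element extraction and the formatting appear verbatim in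
-- both Pythons; only the surrounding control structure differs between the two ports).

-- s.rsplit(' ', 1): split at the LAST space; `none` exactly when there is no space
-- (in Python: the ValueError of `m, l = s.rsplit(' ', 1)` / the `' ' in s` test being false).
-- Hand-ported (PySem has no rsplit with maxsplit): exact because rsplit(' ',1) on a string
-- containing a space returns [before-last-space, after-last-space], and raises otherwise.
def pvRsplitSpace1 : List Char → Option (List Char × List Char)
  | [] => none
  | c :: rest =>
    match pvRsplitSpace1 rest with
    | some (a, b) => some (c :: a, b)
    | none => if c = ' ' then some ([], rest) else none

-- the (module_, library_) pair both Pythons compute from a middle element: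
-- try: rsplit(' ',1) — except (no space): parts = s.split(' ',1) = [s], so module_ = library_ = s.
def pvModLib (e : List Char) : List Char × List Char :=
  let s := PySem.Chars.strip e
  match pvRsplitSpace1 s with
  | some p => p
  | none => (s, s)

-- f"{lib.strip()}.{mod.strip()}".lower().replace(' ', '')
def pvNormApi (lib mod : List Char) : String :=
  String.ofList (PySem.Chars.replace
    (PySem.Chars.lower (PySem.Chars.strip lib ++ '.' :: PySem.Chars.strip mod)) [' '] [])

-- ===== PORT A =====
def parse_string_into_apis (str_ : String) : List String :=
  -- str_.split('\t')[0]  (split on a nonempty separator always yields ≥ 1 piece, so headD is exact)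
  let prediction_part := (PySem.Chars.splitOn str_.toList ['\t']).headD []
  let eles := PySem.Chars.splitOn (PySem.Chars.strip prediction_part) ['.']
  if eles.length < 2 then
    [String.ofList (PySem.Chars.replace (PySem.Chars.lower (PySem.Chars.strip prediction_part)) [' '] [])]
  else
    -- for i in range(1, len(eles)-1): thread (first_lib, apis) through the loop
    let st := ((eles.drop 1).dropLast).foldl
      (fun (st : List Char × List String) e =>
        let p := pvModLib e
        (p.2, st.2 ++ [pvNormApi st.1 p.1]))
      (eles.headD [], [])
    st.2 ++ [pvNormApi st.1 (eles.getLastD [])]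

-- ===== PORT B =====
def parse_string_into_apis_alt (str_ : String) : List String :=
  let prediction_part := (PySem.Chars.splitOn str_.toList ['\t']).headD []
  let eles := PySem.Chars.splitOn (PySem.Chars.strip prediction_part) ['.']
  if eles.length < 2 then
    [String.ofList (PySem.Chars.replace (PySem.Chars.lower (PySem.Chars.strip prediction_part)) [' '] [])]
  else
    let pairs := ((eles.drop 1).dropLast).map pvModLib
    let libs := eles.headD [] :: pairs.map Prod.snd
    let mods := pairs.map Prod.fst ++ [eles.getLastD []]
    (libs.zip mods).map (fun p => pvNormApi p.1 p.2)

-- ===== PRECONDITION & SPEC =====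
def Spec_parse_string_into_apis (str_ : String) (out : List String) : Prop := out = parse_string_into_apis_alt str_
instance (str_ : String) (out : List String) : Decidable (Spec_parse_string_into_apis str_ out) := by unfold Spec_parse_string_into_apis; infer_instance

-- ===== CLAIM (what is proved, stated in full; the proofs are below) =====
def Claim_equal_parse_string_into_apis : Prop := ∀ (str_ : String), Dom_parse_string_into_apis str_ → Spec_parse_string_into_apis str_ (parse_string_into_apis str_)

-- ===== LEMMAS AND PROOFS =====

-- A's accumulator loop (plus the final append) equals B's zip of the shifted lists.
theorem pvLoopZip (mid : List (List Char)) (fl lastE : List Char) (acc : List String) :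
    (mid.foldl
        (fun (st : List Char × List String) e =>
          let p := pvModLib e
          (p.2, st.2 ++ [pvNormApi st.1 p.1]))
        (fl, acc)).2 ++
      [pvNormApi (mid.foldl
        (fun (st : List Char × List String) e =>
          let p := pvModLib e
          (p.2, st.2 ++ [pvNormApi st.1 p.1]))
        (fl, acc)).1 lastE]
    = acc ++ (((fl :: (mid.map pvModLib).map Prod.snd).zip
        ((mid.map pvModLib).map Prod.fst ++ [lastE])).map (fun p => pvNormApi p.1 p.2)) := by
  induction mid generalizing fl acc with
  | nil => simp
  | cons e rest ih => simp [List.foldl_cons, ih]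

-- ===== VERDICT (by name: the statement is the Claim_ definition above) =====
set_option maxHeartbeats 1000000 in
theorem parse_string_into_apis_spec : Claim_equal_parse_string_into_apis := by
  intro str_ _
  unfold Spec_parse_string_into_apis parse_string_into_apis parse_string_into_apis_alt
  by_cases h : (PySem.Chars.splitOn (PySem.Chars.strip ((PySem.Chars.splitOn str_.toList ['\t']).headD [])) ['.']).length < 2
  · simp only [h, if_pos]
  · simp only [h, if_neg, not_false_iff]
    exact pvLoopZip _ _ _ _
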